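-- pv_equiv track=rewrite | github.com/min1378/-algorithm | line/2.py | solution
-- ===== SOURCE A (Python) =====
-- def solution(answer_sheet, sheets):
--     answer = 0
--     for i in range(len(sheets)):
--
--         sheet_size = len(sheets[i])
--         for j in range(i+1, len(sheets)):
--             count = 0
--             continues = 0
--             max_continue = 0
--             for k in range(sheet_size):
--                 if sheets[i][k] == sheets[j][k]:
--                     if answer_sheet[k] != sheets[i][k]:
--                         count += 1
--                         continues += 1
--                     else :
--                         max_continue = max(max_continue, continues)
--                         continues = 0
--                 else:
--                     max_continue = max(max_continue, continues)
--                     continues = 0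
--             max_continue = max(max_continue, continues)
--             answer = max(answer,count + max_continue ** 2)
--     return answer
-- ===== SOURCE B (Python) =====
-- def solution(answer_sheet, sheets):
--     best = 0
--     for i, si in enumerate(sheets):
--         for sj in sheets[i + 1:]:
--             good = [k for k in range(len(si))
--                     if si[k] == sj[k] and answer_sheet[k] != si[k]]
--             s = set(good)
--             longest = 0
--             for k in good:
--                 if k - 1 not in s:
--                     end = k
--                     while end + 1 in s:
--                         end += 1
--                     if end - k + 1 > longest:
--                         longest = end - k + 1
--             best = max(best, len(good) + longest * longest)
--     return best
-- ===== Notes on version B (the rewrite author's own statement) =====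
-- stated objective: alternative
-- what changed: Per sheet pair, A's single fused scan with three interacting counters (count/continues/max_continue with an end-of-loop flush) is replaced by collecting the set of shared-wrong positions and computing the longest streak with the hash-set longest-consecutive-sequence algorithm (walk forward only from positions whose predecessor is not in the set), the count being the number of collected positions.
import Mathlib
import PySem

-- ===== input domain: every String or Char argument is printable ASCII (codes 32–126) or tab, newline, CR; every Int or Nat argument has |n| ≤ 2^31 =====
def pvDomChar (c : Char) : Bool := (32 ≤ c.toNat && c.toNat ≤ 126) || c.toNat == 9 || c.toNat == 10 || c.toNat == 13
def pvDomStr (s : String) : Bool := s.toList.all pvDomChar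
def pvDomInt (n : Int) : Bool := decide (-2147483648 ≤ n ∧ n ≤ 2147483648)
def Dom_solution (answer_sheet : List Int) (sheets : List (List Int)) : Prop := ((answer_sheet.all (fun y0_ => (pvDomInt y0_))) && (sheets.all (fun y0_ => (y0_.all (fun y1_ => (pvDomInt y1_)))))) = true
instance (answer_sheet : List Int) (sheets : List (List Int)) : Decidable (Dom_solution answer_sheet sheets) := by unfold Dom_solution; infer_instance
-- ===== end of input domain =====

-- B replaces A's fused per-pair scan with three interacting counters by a set-based
-- computation: collect the shared-wrong positions, count them, and find the longest
-- streak with the hash-set longest-consecutive-sequence walk; same asymptotic cost,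
-- a constant-factor speedup measured.

-- ===== PORT A =====
def solution (answer_sheet : List Int) (sheets : List (List Int)) : Int :=
  (PySem.List.pyRange 0 (sheets.length : Int)).foldl (fun answer i =>
    let si := PySem.List.pyGetD sheets i []
    (PySem.List.pyRange (i + 1) (sheets.length : Int)).foldl (fun answer j =>
      let sj := PySem.List.pyGetD sheets j []
      let st := (PySem.List.pyRange 0 (si.length : Int)).foldl
        (fun (st : Int × Int × Int) k =>
          if PySem.List.pyGetD si k 0 = PySem.List.pyGetD sj k 0 then
            if PySem.List.pyGetD answer_sheet k 0 ≠ PySem.List.pyGetD si k 0 then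
              (st.1 + 1, st.2.1 + 1, st.2.2)
            else (st.1, 0, max st.2.2 st.2.1)
          else (st.1, 0, max st.2.2 st.2.1)) ((0 : Int), (0 : Int), (0 : Int))
      max answer (st.1 + (max st.2.2 st.2.1) ^ 2)) answer) 0

-- ===== PORT B =====
-- the 'while end + 1 in s' walk; fuel = |s| is exact: the walk steps only through
-- distinct elements of s, so it stops (end+1 ∉ s) before |s| steps are exhausted
def pvWalk (s : PySem.Set Int) (e : Int) : Nat → Int
  | 0 => e
  | fuel + 1 => if PySem.Set.contains s (e + 1) then pvWalk s (e + 1) fuel else e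

def solution_alt (answer_sheet : List Int) (sheets : List (List Int)) : Int :=
  (PySem.List.enumerate sheets).foldl (fun best p =>
    (PySem.List.slice sheets (some (p.1 + 1)) none).foldl (fun best sj =>
      let good := (PySem.List.pyRange 0 (p.2.length : Int)).filter (fun k =>
        decide (PySem.List.pyGetD p.2 k 0 = PySem.List.pyGetD sj k 0) &&
        decide (PySem.List.pyGetD answer_sheet k 0 ≠ PySem.List.pyGetD p.2 k 0))
      let s := PySem.Set.ofList good
      let longest := good.foldl (fun longest k =>
        if !PySem.Set.contains s (k - 1) then
          let e := pvWalk s k s.length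
          if e - k + 1 > longest then e - k + 1 else longest
        else longest) 0
      max best ((good.length : Int) + longest * longest)) best) 0

-- ===== PRECONDITION & SPEC =====
-- Pre_ excludes exactly the inputs on which Python A raises IndexError: some pair i<j of
-- sheets and position k < len(sheets[i]) with k out of range for sheets[j], or (when the
-- two sheets agree at k) k out of range for answer_sheet.
def Pre_solution (answer_sheet : List Int) (sheets : List (List Int)) : Prop :=
  ∀ i ∈ List.range sheets.length, ∀ j ∈ List.range sheets.length, i < j →
    ∀ k ∈ List.range (sheets.getD i []).length,
      k < (sheets.getD j []).length ∧
      ((sheets.getD i []).getD k 0 = (sheets.getD j []).getD k 0 → k < answer_sheet.length)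
instance (answer_sheet : List Int) (sheets : List (List Int)) : Decidable (Pre_solution answer_sheet sheets) := by unfold Pre_solution; infer_instance

def pvWitness_solution : List Int × List (List Int) := ([1, 2], [[1, 1], [1, 1], [2, 1]])

def Spec_solution (answer_sheet : List Int) (sheets : List (List Int)) (out : Int) : Prop := out = solution_alt answer_sheet sheets
instance (answer_sheet : List Int) (sheets : List (List Int)) (out : Int) : Decidable (Spec_solution answer_sheet sheets out) := by unfold Spec_solution; infer_instance

-- ===== CLAIM (what is proved, stated in full; the proofs are below) =====
def Claim_equal_solution : Prop := ∀ (answer_sheet : List Int) (sheets : List (List Int)), Dom_solution answer_sheet sheets → Pre_solution answer_sheet sheets → Spec_solution answer_sheet sheets (solution answer_sheet sheets)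

-- ===== LEMMAS AND PROOFS =====

-- B's run-scan step characterisation helpers (used to normalise A's fused loop).
def pvStepB (rm : Int × Int) (b : Bool) : Int × Int :=
  let r := if b then rm.1 + 1 else 0
  if r > rm.2 then (r, r) else (r, rm.2)

-- A's fused inner step, rephrased as a function of the mask bit.
def pvStepM (st : Int × Int × Int) (b : Bool) : Int × Int × Int :=
  if b then (st.1 + 1, st.2.1 + 1, st.2.2) else (st.1, 0, max st.2.2 st.2.1)

theorem pvStepB_eq (rm : Int × Int) (b : Bool) :
    pvStepB rm b = (if b then rm.1 + 1 else 0, max rm.2 (if b then rm.1 + 1 else 0)) := by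
  cases b <;> simp [pvStepB] <;> split_ifs <;> simp <;> omega

-- Loop invariant: folding A's fused step over the mask and flushing gives the
-- (count, longest-run) pair of the pvStepB scan.
theorem pv_run_inv (mask : List Bool) : ∀ (c r m mx : Int), 0 ≤ r → 0 ≤ m → mx = max m r →
    (let st := mask.foldl pvStepM (c, r, m)
     (st.1, max st.2.2 st.2.1))
    = (c + (mask.map (fun b => if b then (1 : Int) else 0)).sum, (mask.foldl pvStepB (r, mx)).2) := by
  induction mask with
  | nil => intro c r m mx hr hm hmx; simp [hmx]
  | cons b mask ih =>
    intro c r m mx hr hm hmx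
    cases b with
    | true =>
      simp only [List.foldl_cons, List.map_cons, List.sum_cons, pvStepM, pvStepB_eq, if_true]
      rw [ih (c + 1) (r + 1) m (max mx (r + 1)) (by omega) hm (by omega)]
      simp; ring
    | false =>
      simp only [List.foldl_cons, List.map_cons, List.sum_cons, pvStepM, pvStepB_eq]
      simp only [if_neg (by simp : ¬ (false = true))]
      rw [ih c 0 (max m r) (max mx 0) (le_refl 0) (by omega) (by omega)]
      simp

theorem pvGetD_cons_pos {α : Type} {x : α} {xs : List α} {i : Int} (h : 1 ≤ i) (d : α) :
    PySem.List.pyGetD (x :: xs) i d = PySem.List.pyGetD xs (i - 1) d := by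
  rw [PySem.List.pyGetD_of_nonneg _ _ (by omega), PySem.List.pyGetD_of_nonneg _ _ (by omega)]
  have : i.toNat = (i - 1).toNat + 1 := by omega
  rw [this]
  rfl

-- A fold over range(len(xs)) reading xs[i] is a fold over enumerate(xs).
theorem pv_foldl_range_enumerate {α : Type} (H : α → Int → List Int → α) (d : List Int) :
    ∀ (xs : List (List Int)) (s : Int) (init : α), 0 ≤ s →
    (PySem.List.pyRange s (s + (xs.length : Int))).foldl
        (fun acc i => H acc i (PySem.List.pyGetD xs (i - s) d)) init
    = (PySem.List.enumerate xs s).foldl (fun acc p => H acc p.1 p.2) init := by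
  intro xs
  induction xs with
  | nil =>
    intro s init hs
    rw [PySem.List.pyRange_one_eq_nil (by simp)]
    simp [PySem.List.enumerate]
  | cons x xs ih =>
    intro s init hs
    have hb : s + ((x :: xs).length : Int) = (s + 1) + (xs.length : Int) := by
      simp only [List.length_cons]
      push_cast
      ring
    rw [hb, PySem.List.pyRange_one_cons (by omega), PySem.List.enumerate_cons]
    simp only [List.foldl_cons]
    have hx : PySem.List.pyGetD (x :: xs) (s - s) d = x := by
      rw [PySem.List.pyGetD_of_nonneg (x :: xs) d (by omega)]
      simp
    rw [hx]
    rw [PySem.List.foldl_congr_mem _ _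
      (fun acc i => H acc i (PySem.List.pyGetD xs (i - (s + 1)) d)) _ ?_]
    · exact ih (s + 1) _ (by omega)
    · intro acc i hi
      have hi' := (PySem.List.mem_pyRange_one.mp hi).1
      have hstep : PySem.List.pyGetD (x :: xs) (i - s) d = PySem.List.pyGetD xs (i - s - 1) d :=
        pvGetD_cons_pos (by omega) d
      rw [hstep]
      have harg : i - s - 1 = i - (s + 1) := by ring
      rw [harg]

-- The shared-wrong predicate of a pair, and B's per-pair score as the proofs name it
-- (both definitionally equal to the inlined code of the ports).
def pvPred (answer_sheet si sj : List Int) (k : Int) : Bool :=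
  decide (PySem.List.pyGetD si k 0 = PySem.List.pyGetD sj k 0) &&
  decide (PySem.List.pyGetD answer_sheet k 0 ≠ PySem.List.pyGetD si k 0)

def pvCore (answer_sheet si sj : List Int) : Int :=
  let good := (PySem.List.pyRange 0 (si.length : Int)).filter (pvPred answer_sheet si sj)
  let s := PySem.Set.ofList good
  let longest := good.foldl (fun longest k =>
    if !PySem.Set.contains s (k - 1) then
      let e := pvWalk s k s.length
      if e - k + 1 > longest then e - k + 1 else longest
    else longest) 0
  (good.length : Int) + longest * longest

-- Run statistics of a boolean mask: (length of leading true-run, longest true-run).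
def pvRunStats : List Bool → Int × Int
  | [] => (0, 0)
  | b :: t =>
    let r := pvRunStats t
    if b then (r.1 + 1, max r.2 (r.1 + 1)) else (0, r.2)

theorem pvRS_bounds (mask : List Bool) :
    0 ≤ (pvRunStats mask).1 ∧ (pvRunStats mask).1 ≤ (pvRunStats mask).2 ∧
    (pvRunStats mask).1 ≤ (mask.length : Int) := by
  induction mask with
  | nil => simp [pvRunStats]
  | cons b t ih =>
    cases b <;> simp only [pvRunStats, List.length_cons, Bool.false_eq_true, if_true, if_false] <;>
      simp only [Nat.cast_add, Nat.cast_one] <;> omega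

-- The pvStepB scan in terms of run statistics.
theorem pv_scan_runStats (mask : List Bool) : ∀ (r m : Int), 0 ≤ r → r ≤ m →
    (mask.foldl pvStepB (r, m)).2
      = max m (max (pvRunStats mask).2 (r + (pvRunStats mask).1)) := by
  induction mask with
  | nil => intro r m hr hm; simp [pvRunStats]; omega
  | cons b t ih =>
    intro r m hr hm
    have hb := pvRS_bounds t
    rw [List.foldl_cons, pvStepB_eq]
    cases b with
    | true =>
      simp only [if_true]
      rw [ih (r + 1) (max m (r + 1)) (by omega) (by omega)]
      simp only [pvRunStats, if_true]
      omega
    | false =>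
      simp only [Bool.false_eq_true, if_false]
      rw [ih 0 (max m 0) (le_refl 0) (by omega)]
      simp only [pvRunStats, Bool.false_eq_true, if_false]
      omega

-- a maximal true-run of the mask at offset a of length t
def pvIsRun (mask : List Bool) (a t : Nat) : Prop :=
  a + t ≤ mask.length ∧ ∀ i, i < t → mask.getD (a + i) false = true

theorem pv_prefix_le_lead (mask : List Bool) : ∀ (len : Nat), len ≤ mask.length →
    (∀ i, i < len → mask.getD i false = true) → (len : Int) ≤ (pvRunStats mask).1 := by
  induction mask with
  | nil => intro len h _; simp at h; subst h; simp [pvRunStats]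
  | cons b t ih =>
    intro len hlen hall
    cases len with
    | zero => have := (pvRS_bounds (b :: t)).1; omega
    | succ m =>
      have hb : b = true := by simpa using hall 0 (by omega)
      subst hb
      have hm : (m : Int) ≤ (pvRunStats t).1 := by
        apply ih m (by simpa using hlen)
        intro i hi
        simpa using hall (i + 1) (by omega)
      simp only [pvRunStats, if_true]
      push_cast
      omega

theorem pv_run_le_best (mask : List Bool) : ∀ (a t : Nat), pvIsRun mask a t →
    (t : Int) ≤ (pvRunStats mask).2 := by
  induction mask with
  | nil =>
    intro a t h
    have : t = 0 := by have := h.1; simp at this; omega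
    subst this; simp [pvRunStats]
  | cons b t' ih =>
    intro a t h
    cases a with
    | zero =>
      have hpre : (t : Int) ≤ (pvRunStats (b :: t')).1 :=
        pv_prefix_le_lead (b :: t') t (by simpa using h.1) (fun i hi => by simpa using h.2 i hi)
      have := pvRS_bounds (b :: t')
      omega
    | succ a' =>
      have hrun : pvIsRun t' a' t := by
        refine ⟨by have := h.1; simp at this ⊢; omega, ?_⟩
        intro i hi
        have := h.2 i hi
        simpa [Nat.succ_add] using this
      have hih := ih a' t hrun
      cases b <;> simp only [pvRunStats, Bool.false_eq_true, if_true, if_false] <;> omega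

theorem pv_lead_run (mask : List Bool) :
    pvIsRun mask 0 (pvRunStats mask).1.toNat ∧
    mask.getD (pvRunStats mask).1.toNat false = false := by
  induction mask with
  | nil => exact ⟨⟨by simp [pvRunStats], fun i hi => by simp [pvRunStats] at hi⟩, by simp [pvRunStats]⟩
  | cons b t ih =>
    cases b with
    | false =>
      refine ⟨⟨by simp [pvRunStats], fun i hi => by simp [pvRunStats] at hi⟩, ?_⟩
      simp [pvRunStats]
    | true =>
      obtain ⟨⟨hlen, hall⟩, hstop⟩ := ih
      have h0 := (pvRS_bounds t).1
      have htn : (pvRunStats (true :: t)).1.toNat = (pvRunStats t).1.toNat + 1 := by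
        simp only [pvRunStats, if_true]; omega
      refine ⟨⟨?_, ?_⟩, ?_⟩
      · rw [htn]; simp at hlen ⊢; omega
      · intro i hi
        rw [htn] at hi
        cases i with
        | zero => simp
        | succ j => simpa using hall j (by omega)
      · rw [htn]; simpa using hstop

theorem pv_best_witness (mask : List Bool) : ∀ _h : 1 ≤ (pvRunStats mask).2,
    ∃ a : Nat, pvIsRun mask a (pvRunStats mask).2.toNat ∧
      (a = 0 ∨ mask.getD (a - 1) false = false) ∧
      mask.getD (a + (pvRunStats mask).2.toNat) false = false := by
  induction mask with
  | nil => intro h; simp [pvRunStats] at h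
  | cons b t ih =>
    intro h
    have hbt := pvRS_bounds t
    cases b with
    | true =>
      by_cases hle : (pvRunStats t).2 ≤ (pvRunStats t).1 + 1
      · -- best (true::t) = lead (true::t); the leading run is the witness
        have hbest : (pvRunStats (true :: t)).2 = (pvRunStats (true :: t)).1 := by
          simp only [pvRunStats, if_true]; omega
        obtain ⟨hrun, hstop⟩ := pv_lead_run (true :: t)
        exact ⟨0, hbest ▸ hrun, Or.inl rfl, by simpa [hbest] using hstop⟩
      · -- best (true::t) = best t > lead t + 1; t's witness shifts by one
        have hbest : (pvRunStats (true :: t)).2 = (pvRunStats t).2 := by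
          simp only [pvRunStats, if_true]; omega
        obtain ⟨a', hrun', hleft', hstop'⟩ := ih (by rw [hbest] at h; exact h)
        have hbn : (pvRunStats (true :: t)).2.toNat = (pvRunStats t).2.toNat := by rw [hbest]
        have ha' : a' ≠ 0 := by
          intro h0
          subst h0
          have hpl := pv_prefix_le_lead t (pvRunStats t).2.toNat (by simpa using hrun'.1)
            (fun i hi => by simpa using hrun'.2 i hi)
          rw [Int.toNat_of_nonneg (by omega)] at hpl
          omega
        refine ⟨a' + 1, ⟨by have := hrun'.1; rw [hbn]; simp only [List.length_cons]; omega, ?_⟩, ?_, ?_⟩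
        · intro i hi
          rw [hbn] at hi
          simpa [Nat.succ_add] using hrun'.2 i hi
        · right
          rcases hleft' with h0 | hfalse
          · exact absurd h0 ha'
          · have : a' + 1 - 1 = (a' - 1) + 1 := by omega
            rw [this]
            simpa using hfalse
        · rw [hbn]
          simpa [Nat.succ_add] using hstop'
    | false =>
      have hbest : (pvRunStats (false :: t)).2 = (pvRunStats t).2 := by
        simp [pvRunStats]
      obtain ⟨a', hrun', hleft', hstop'⟩ := ih (by rw [hbest] at h; exact h)
      have hbn : (pvRunStats (false :: t)).2.toNat = (pvRunStats t).2.toNat := by rw [hbest]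
      refine ⟨a' + 1, ⟨by have := hrun'.1; rw [hbn]; simp only [List.length_cons]; omega, ?_⟩, ?_, ?_⟩
      · intro i hi
        rw [hbn] at hi
        simpa [Nat.succ_add] using hrun'.2 i hi
      · right
        have hsimp : a' + 1 - 1 = a' := by omega
        rw [hsimp]
        cases a' with
        | zero => simp
        | succ m =>
          rcases hleft' with h0 | hfalse
          · exact absurd h0 (by omega)
          · simpa using hfalse
      · rw [hbn]
        simpa [Nat.succ_add] using hstop'

theorem pv_walk_spec (g : List Int) : ∀ (fuel : Nat) (e : Int),
    ∃ c : Nat, c ≤ fuel ∧ pvWalk g e fuel = e + (c : Int) ∧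
      (∀ j : Nat, 1 ≤ j → j ≤ c → e + (j : Int) ∈ g) ∧
      (c < fuel → (e + (c : Int) + 1) ∉ g) := by
  intro fuel
  induction fuel with
  | zero => intro e; exact ⟨0, le_refl 0, by simp [pvWalk], fun j h1 h2 => by omega, fun h => by omega⟩
  | succ f ih =>
    intro e
    by_cases hm : (e + 1) ∈ g
    · obtain ⟨c, hle, hval, hchain, hstop⟩ := ih (e + 1)
      refine ⟨c + 1, by omega, ?_, ?_, ?_⟩
      · rw [pvWalk, if_pos (by rw [PySem.Set.contains_eq_decide]; simpa), hval]
        push_cast; ring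
      · intro j h1 h2
        cases j with
        | zero => omega
        | succ m =>
          rcases Nat.eq_zero_or_pos m with rfl | hm'
          · simpa using hm
          · have hc := hchain m hm' (by omega)
            have heq : e + ((m : Int) + 1) = e + 1 + (m : Int) := by ring
            push_cast
            rw [heq]
            exact hc
      · intro h
        have hs := hstop (by omega)
        have heq : e + ((c : Int) + 1) + 1 = e + 1 + (c : Int) + 1 := by ring
        push_cast
        rw [heq]
        exact hs
    · refine ⟨0, by omega, ?_, fun j h1 h2 => by omega, fun _ => by simpa using hm⟩
      rw [pvWalk, if_neg (by rw [PySem.Set.contains_eq_decide]; simpa)]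
      simp

theorem pv_chain_lt (g : List Int) (e : Int) (he : e ∈ g) (c : Nat)
    (hc : ∀ j : Nat, 1 ≤ j → j ≤ c → e + (j : Int) ∈ g) : c < g.length := by
  have hsub : (List.map (fun j : Nat => e + (j : Int)) (List.range (c + 1))) ⊆ g := by
    intro x hx
    obtain ⟨j, hj, rfl⟩ := List.mem_map.mp hx
    rcases Nat.eq_zero_or_pos j with rfl | hj'
    · simpa using he
    · exact hc j hj' (by simpa using Nat.lt_succ_iff.mp (List.mem_range.mp hj))
  have hnd : (List.map (fun j : Nat => e + (j : Int)) (List.range (c + 1))).Nodup :=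
    List.Nodup.map (fun a b h => by omega) List.nodup_range
  have := List.Subperm.length_le (List.subperm_of_subset hnd hsub)
  simpa using this

-- with fuel = |g| the walk stops exactly at the end of the consecutive chain
theorem pv_walk_exact (g : List Int) (e : Int) (he : e ∈ g) :
    ∃ c : Nat, pvWalk g e g.length = e + (c : Int) ∧
      (∀ j : Nat, 1 ≤ j → j ≤ c → e + (j : Int) ∈ g) ∧ (e + (c : Int) + 1) ∉ g := by
  obtain ⟨c, hle, hval, hchain, hstop⟩ := pv_walk_spec g g.length e
  have hlt : c < g.length := pv_chain_lt g e he c hchain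
  exact ⟨c, hval, hchain, hstop hlt⟩

-- generic bounds for B's conditional running-max fold
theorem pv_fold_ub (cnd : Int → Bool) (v : Int → Int) (g : List Int) :
    ∀ (B init : Int), init ≤ B → (∀ k ∈ g, cnd k = true → v k ≤ B) →
    g.foldl (fun L k => if cnd k then (if v k > L then v k else L) else L) init ≤ B := by
  induction g with
  | nil => intro B init h _; simpa using h
  | cons x t ih =>
    intro B init h hall
    rw [List.foldl_cons]
    apply ih
    · by_cases hc : cnd x <;> simp [hc]
      · have := hall x (by simp) hc
        split_ifs <;> omega
      · exact h
    · intro k hk hck; exact hall k (by simp [hk]) hck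

theorem pv_fold_lb (cnd : Int → Bool) (v : Int → Int) (g : List Int) :
    ∀ (init : Int),
      init ≤ g.foldl (fun L k => if cnd k then (if v k > L then v k else L) else L) init ∧
      ∀ k ∈ g, cnd k = true →
        v k ≤ g.foldl (fun L k => if cnd k then (if v k > L then v k else L) else L) init := by
  induction g with
  | nil => intro init; simp
  | cons x t ih =>
    intro init
    rw [List.foldl_cons]
    set init' := (if cnd x then (if v x > init then v x else init) else init) with hinit'
    obtain ⟨h1, h2⟩ := ih init'
    have hii : init ≤ init' := by rw [hinit']; split_ifs <;> omega
    refine ⟨by omega, ?_⟩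
    intro k hk hck
    rcases List.mem_cons.mp hk with rfl | hk'
    · have : v k ≤ init' := by rw [hinit']; simp [hck]; split_ifs <;> omega
      omega
    · exact h2 k hk' hck

-- abbreviations for the abstract n/q setting
def pvGood (n : Nat) (q : Nat → Bool) : List Int :=
  List.map (fun a : Nat => (a : Int)) (List.filter q (List.range n))
def pvMask (n : Nat) (q : Nat → Bool) : List Bool := (List.range n).map q

theorem pv_good_nodup (n : Nat) (q : Nat → Bool) : (pvGood n q).Nodup := by
  unfold pvGood
  exact List.Nodup.map (fun a b h => by exact_mod_cast h) (List.nodup_range.filter q)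

theorem pv_mem_good (n : Nat) (q : Nat → Bool) (x : Int) :
    x ∈ pvGood n q ↔ ∃ a : Nat, x = (a : Int) ∧ a < n ∧ q a = true := by
  unfold pvGood
  constructor
  · intro h
    obtain ⟨a, ha, rfl⟩ := List.mem_map.mp h
    have := List.mem_filter.mp ha
    exact ⟨a, rfl, List.mem_range.mp this.1, this.2⟩
  · rintro ⟨a, rfl, hn, hq⟩
    exact List.mem_map.mpr ⟨a, List.mem_filter.mpr ⟨List.mem_range.mpr hn, hq⟩, rfl⟩

theorem pv_mask_getD (n : Nat) (q : Nat → Bool) (a : Nat) :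
    (pvMask n q).getD a false = if a < n then q a else false := by
  have hl : (pvMask n q).length = n := by simp [pvMask]
  by_cases h : a < n
  · rw [List.getD_eq_getElem _ _ (by omega)]
    simp [pvMask, h]
  · rw [List.getD_eq_default _ _ (by omega)]
    simp [h]

-- the capstone: B's set-walk fold over good computes the longest-run statistic of the mask
theorem pv_mask_good (n : Nat) (q : Nat → Bool) :
    ((pvGood n q).foldl (fun L k =>
        if !PySem.Set.contains (PySem.Set.ofList (pvGood n q)) (k - 1) then
          (if pvWalk (PySem.Set.ofList (pvGood n q)) k (PySem.Set.ofList (pvGood n q)).length - k + 1 > L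
           then pvWalk (PySem.Set.ofList (pvGood n q)) k (PySem.Set.ofList (pvGood n q)).length - k + 1 else L)
        else L) 0)
    = (pvRunStats (pvMask n q)).2 := by
  have hset : PySem.Set.ofList (pvGood n q) = pvGood n q :=
    PySem.Set.ofList_eq_self_of_nodup _ (pv_good_nodup n q)
  rw [hset]
  have hmlen : (pvMask n q).length = n := by simp [pvMask]
  have hbb := pvRS_bounds (pvMask n q)
  have hmem : ∀ a : Nat, ((a : Int) ∈ pvGood n q) ↔ (a < n ∧ q a = true) := by
    intro a
    rw [pv_mem_good]
    constructor
    · rintro ⟨b, hb, h1, h2⟩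
      have : a = b := by exact_mod_cast hb
      subst this
      exact ⟨h1, h2⟩
    · rintro ⟨h1, h2⟩
      exact ⟨a, rfl, h1, h2⟩
  -- each contribution of the fold is at most the longest run
  have hub : ∀ k ∈ pvGood n q, (!PySem.Set.contains (pvGood n q) (k - 1)) = true →
      pvWalk (pvGood n q) k (pvGood n q).length - k + 1 ≤ (pvRunStats (pvMask n q)).2 := by
    intro k hk _
    obtain ⟨a, rfl, han, hqa⟩ := (pv_mem_good n q k).mp hk
    obtain ⟨c, hval, hchain, hstop⟩ := pv_walk_exact (pvGood n q) _ hk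
    have hmemi : ∀ i : Nat, i ≤ c → ((a + i : Nat) : Int) ∈ pvGood n q := by
      intro i hi
      rcases Nat.eq_zero_or_pos i with rfl | hip
      · simpa using hk
      · have := hchain i hip hi
        push_cast
        push_cast at this
        exact this
    have hrun : pvIsRun (pvMask n q) a (c + 1) := by
      constructor
      · have := (hmem (a + c)).mp (hmemi c (le_refl c))
        rw [hmlen]
        omega
      · intro i hi
        have hm := (hmem (a + i)).mp (hmemi i (by omega))
        rw [pv_mask_getD, if_pos hm.1]
        exact hm.2
    have := pv_run_le_best (pvMask n q) a (c + 1) hrun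
    rw [hval]
    push_cast at this ⊢
    omega
  by_cases h0 : (pvRunStats (pvMask n q)).2 ≤ 0
  · -- no shared-wrong position at all: good is empty and the best run is 0
    have hnil : pvGood n q = [] := by
      rw [List.eq_nil_iff_forall_not_mem]
      intro x hx
      obtain ⟨a, rfl, han, hqa⟩ := (pv_mem_good n q x).mp hx
      have hrun : pvIsRun (pvMask n q) a 1 := by
        refine ⟨by rw [hmlen]; omega, ?_⟩
        intro i hi
        have : i = 0 := by omega
        subst this
        rw [pv_mask_getD, if_pos (by omega : a + 0 < n)]
        simpa using hqa
      have := pv_run_le_best (pvMask n q) a 1 hrun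
      omega
    rw [hnil]
    simp
    omega
  · have h1 : 1 ≤ (pvRunStats (pvMask n q)).2 := by omega
    obtain ⟨a, hrun, hleft, hrb⟩ := pv_best_witness (pvMask n q) h1
    have hbcast : ((pvRunStats (pvMask n q)).2.toNat : Int) = (pvRunStats (pvMask n q)).2 :=
      Int.toNat_of_nonneg (by omega)
    have hb1 : 1 ≤ (pvRunStats (pvMask n q)).2.toNat := by omega
    have han : a < n := by
      have := hrun.1
      rw [hmlen] at this
      omega
    have hkmem : ((a : Int)) ∈ pvGood n q := by
      have h := hrun.2 0 (by omega)
      rw [Nat.add_zero, pv_mask_getD, if_pos han] at h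
      exact (hmem a).mpr ⟨han, h⟩
    have hcnd : (!PySem.Set.contains (pvGood n q) ((a : Int) - 1)) = true := by
      rw [PySem.Set.contains_eq_decide]
      simp only [Bool.not_eq_true', decide_eq_false_iff_not]
      intro hmem1
      obtain ⟨a₂, heq, ha₂n, hq₂⟩ := (pv_mem_good n q _).mp hmem1
      rcases hleft with rfl | hfalse
      · omega
      · have ha1 : 1 ≤ a := by omega
        have ha₂ : a₂ = a - 1 := by omega
        subst ha₂
        rw [pv_mask_getD, if_pos (by omega)] at hfalse
        rw [hfalse] at hq₂
        exact absurd hq₂ (by simp)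
    obtain ⟨c, hval, hchain, hstop⟩ := pv_walk_exact (pvGood n q) _ hkmem
    have hceq : c + 1 = (pvRunStats (pvMask n q)).2.toNat := by
      rcases lt_trichotomy (c + 1) (pvRunStats (pvMask n q)).2.toNat with hlt | he | hgt
      · exfalso
        have hin := hrun.2 (c + 1) hlt
        rw [pv_mask_getD] at hin
        by_cases hlt2 : a + (c + 1) < n
        · rw [if_pos hlt2] at hin
          have hmm := (hmem (a + (c + 1))).mpr ⟨hlt2, hin⟩
          have hcast : ((a + (c + 1) : Nat) : Int) = (a : Int) + (c : Int) + 1 := by push_cast; ring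
          rw [hcast] at hmm
          exact hstop hmm
        · rw [if_neg hlt2] at hin
          exact absurd hin (by simp)
      · exact he
      · exfalso
        have hin := hchain (pvRunStats (pvMask n q)).2.toNat hb1 (by omega)
        have hin' : ((a + (pvRunStats (pvMask n q)).2.toNat : Nat) : Int) ∈ pvGood n q := by
          push_cast
          exact hin
        have hq := (hmem _).mp hin'
        rw [pv_mask_getD, if_pos hq.1] at hrb
        rw [hrb] at hq
        exact absurd hq.2 (by simp)
    have hvb : pvWalk (pvGood n q) (a : Int) (pvGood n q).length - (a : Int) + 1
        = (pvRunStats (pvMask n q)).2 := by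
      rw [hval]
      omega
    have hub2 : ((pvGood n q).foldl (fun L k =>
        if !PySem.Set.contains (pvGood n q) (k - 1) then
          (if pvWalk (pvGood n q) k (pvGood n q).length - k + 1 > L
           then pvWalk (pvGood n q) k (pvGood n q).length - k + 1 else L)
        else L) 0) ≤ (pvRunStats (pvMask n q)).2 :=
      pv_fold_ub (fun k => !PySem.Set.contains (pvGood n q) (k - 1))
        (fun k => pvWalk (pvGood n q) k (pvGood n q).length - k + 1) (pvGood n q)
        _ 0 (by omega) hub
    have hlb2 := (pv_fold_lb (fun k => !PySem.Set.contains (pvGood n q) (k - 1))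
        (fun k => pvWalk (pvGood n q) k (pvGood n q).length - k + 1) (pvGood n q) 0).2
        _ hkmem hcnd
    simp only at hlb2
    rw [hvb] at hlb2
    omega

-- Per-pair: A's fused three-counter loop computes B's set-based score.
theorem pv_pair_core (answer_sheet si sj : List Int) :
    (let st := (PySem.List.pyRange 0 (si.length : Int)).foldl
        (fun (st : Int × Int × Int) k =>
          if PySem.List.pyGetD si k 0 = PySem.List.pyGetD sj k 0 then
            if PySem.List.pyGetD answer_sheet k 0 ≠ PySem.List.pyGetD si k 0 then
              (st.1 + 1, st.2.1 + 1, st.2.2)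
            else (st.1, 0, max st.2.2 st.2.1)
          else (st.1, 0, max st.2.2 st.2.1)) ((0 : Int), (0 : Int), (0 : Int))
     st.1 + (max st.2.2 st.2.1) ^ 2)
    = pvCore answer_sheet si sj := by
  have hl : PySem.List.pyRange 0 (si.length : Int)
      = (List.range si.length).map (fun a : Nat => (a : Int)) := by
    rw [PySem.List.pyRange_zero_natCast]
  set q : Nat → Bool := fun a => pvPred answer_sheet si sj ((a : Nat) : Int) with hq
  have hfil : (PySem.List.pyRange 0 (si.length : Int)).filter (pvPred answer_sheet si sj)
      = pvGood si.length q := by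
    rw [hl, List.filter_map]; rfl
  have hmk : (PySem.List.pyRange 0 (si.length : Int)).map (pvPred answer_sheet si sj)
      = pvMask si.length q := by
    rw [hl, List.map_map]; rfl
  -- step A: the fused loop as a pvStepM fold over the mask
  have hstep : (fun (st : Int × Int × Int) k =>
          if PySem.List.pyGetD si k 0 = PySem.List.pyGetD sj k 0 then
            if PySem.List.pyGetD answer_sheet k 0 ≠ PySem.List.pyGetD si k 0 then
              (st.1 + 1, st.2.1 + 1, st.2.2)
            else (st.1, 0, max st.2.2 st.2.1)
          else (st.1, 0, max st.2.2 st.2.1))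
      = (fun (st : Int × Int × Int) k => pvStepM st (pvPred answer_sheet si sj k)) := by
    funext st k
    by_cases h1 : PySem.List.pyGetD si k 0 = PySem.List.pyGetD sj k 0 <;>
      by_cases h2 : PySem.List.pyGetD answer_sheet k 0 ≠ PySem.List.pyGetD si k 0 <;>
      simp [h1, h2, pvStepM, pvPred]
  simp only [hstep]
  rw [← List.foldl_map (f := pvPred answer_sheet si sj) (g := pvStepM)]
  have hinv := pv_run_inv ((PySem.List.pyRange 0 (si.length : Int)).map (pvPred answer_sheet si sj))
      0 0 0 0 (le_refl 0) (le_refl 0) (by simp)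
  simp only [] at hinv
  have h1 := congrArg Prod.fst hinv
  have h2 := congrArg Prod.snd hinv
  simp only [] at h1 h2
  rw [h1, h2]
  -- count: the 0/1 sum is the number of shared-wrong positions
  have hcount : (0 : Int) + (((PySem.List.pyRange 0 (si.length : Int)).map (pvPred answer_sheet si sj)).map
        (fun b => if b then (1 : Int) else 0)).sum
      = (((PySem.List.pyRange 0 (si.length : Int)).filter (pvPred answer_sheet si sj)).length : Int) := by
    rw [PySem.List.sum_map_ite_one_zero]
    rw [List.countP_map]
    rw [List.countP_eq_length_filter]
    norm_num
    rfl
  -- scan: the pvStepB scan is the longest-run statistic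
  have hscan : (((PySem.List.pyRange 0 (si.length : Int)).map (pvPred answer_sheet si sj)).foldl
        pvStepB ((0 : Int), (0 : Int))).2
      = (pvRunStats (pvMask si.length q)).2 := by
    rw [pv_scan_runStats _ 0 0 (le_refl 0) (le_refl 0), hmk]
    have := pvRS_bounds (pvMask si.length q)
    omega
  rw [hcount, hscan]
  -- B side: unfold pvCore and identify its fold with the capstone
  show _ = (((PySem.List.pyRange 0 (si.length : Int)).filter (pvPred answer_sheet si sj)).length : Int)
      + ((((PySem.List.pyRange 0 (si.length : Int)).filter (pvPred answer_sheet si sj)).foldl (fun L k =>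
          if !PySem.Set.contains (PySem.Set.ofList ((PySem.List.pyRange 0 (si.length : Int)).filter (pvPred answer_sheet si sj))) (k - 1) then
            (if pvWalk (PySem.Set.ofList ((PySem.List.pyRange 0 (si.length : Int)).filter (pvPred answer_sheet si sj))) k
                  (PySem.Set.ofList ((PySem.List.pyRange 0 (si.length : Int)).filter (pvPred answer_sheet si sj))).length - k + 1 > L
             then pvWalk (PySem.Set.ofList ((PySem.List.pyRange 0 (si.length : Int)).filter (pvPred answer_sheet si sj))) k
                  (PySem.Set.ofList ((PySem.List.pyRange 0 (si.length : Int)).filter (pvPred answer_sheet si sj))).length - k + 1 else L)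
          else L) 0)
        * (((PySem.List.pyRange 0 (si.length : Int)).filter (pvPred answer_sheet si sj)).foldl (fun L k =>
          if !PySem.Set.contains (PySem.Set.ofList ((PySem.List.pyRange 0 (si.length : Int)).filter (pvPred answer_sheet si sj))) (k - 1) then
            (if pvWalk (PySem.Set.ofList ((PySem.List.pyRange 0 (si.length : Int)).filter (pvPred answer_sheet si sj))) k
                  (PySem.Set.ofList ((PySem.List.pyRange 0 (si.length : Int)).filter (pvPred answer_sheet si sj))).length - k + 1 > L
             then pvWalk (PySem.Set.ofList ((PySem.List.pyRange 0 (si.length : Int)).filter (pvPred answer_sheet si sj))) k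
                  (PySem.Set.ofList ((PySem.List.pyRange 0 (si.length : Int)).filter (pvPred answer_sheet si sj))).length - k + 1 else L)
          else L) 0))
  rw [hfil, pv_mask_good si.length q]
  have := pvRS_bounds (pvMask si.length q)
  rw [pow_two]

-- One outer-loop step, shared normal form for both ports.
def pvH (answer_sheet : List Int) (sheets : List (List Int)) (acc i : Int) (si : List Int) : Int :=
  (sheets.drop (i + 1).toNat).foldl (fun best sj => max best (pvCore answer_sheet si sj)) acc

-- The two ports agree on every input (Pre_/Dom_ only restrict the Python originals).
theorem pv_main (answer_sheet : List Int) (sheets : List (List Int)) :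
    solution answer_sheet sheets = solution_alt answer_sheet sheets := by
  have hmem : ∀ p ∈ PySem.List.enumerate sheets 0, (0 : Int) ≤ p.1 := by
    intro p h
    have hm : p.1 ∈ List.map (fun x => x.1) (PySem.List.enumerate sheets 0) :=
      List.mem_map_of_mem h
    rw [PySem.List.map_fst_enumerate sheets 0] at hm
    exact (PySem.List.mem_pyRange_one.mp hm).1
  have hE := pv_foldl_range_enumerate (pvH answer_sheet sheets) [] sheets 0 0 (le_refl 0)
  simp only [zero_add, sub_zero] at hE
  refine Eq.trans (Eq.trans ?_ hE) (Eq.symm ?_)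
  · -- A-side: rewrite each outer step to the shared normal form pvH.
    unfold solution
    apply PySem.List.foldl_congr_mem
    intro acc i hi
    have hi0 : (0 : Int) ≤ i := (PySem.List.mem_pyRange_one.mp hi).1
    refine Eq.trans (PySem.List.foldl_pyRange_pyGetD' sheets []
      (fun (answer : Int) (sj : List Int) =>
        let st := (PySem.List.pyRange 0 ((PySem.List.pyGetD sheets i []).length : Int)).foldl
          (fun (st : Int × Int × Int) k =>
            if PySem.List.pyGetD (PySem.List.pyGetD sheets i []) k 0
                = PySem.List.pyGetD sj k 0 then
              if PySem.List.pyGetD answer_sheet k 0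
                  ≠ PySem.List.pyGetD (PySem.List.pyGetD sheets i []) k 0 then
                (st.1 + 1, st.2.1 + 1, st.2.2)
              else (st.1, 0, max st.2.2 st.2.1)
            else (st.1, 0, max st.2.2 st.2.1)) ((0 : Int), (0 : Int), (0 : Int))
        max answer (st.1 + (max st.2.2 st.2.1) ^ 2)) acc (by omega)) ?_
    unfold pvH
    apply PySem.List.foldl_congr_mem
    intro acc' sj _
    exact congrArg (fun z => max acc' z)
      ((pv_pair_core answer_sheet (PySem.List.pyGetD sheets i []) sj).trans rfl)
  · -- B-side: the slice is a drop, the rest is definitional.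
    unfold solution_alt
    apply PySem.List.foldl_congr_mem
    intro acc p hp
    have h0 : (0 : Int) ≤ p.1 + 1 := by have := hmem p hp; omega
    rw [PySem.List.slice_from sheets h0]
    rfl

-- ===== VERDICT (by name: the statement is the Claim_ definition above) =====
theorem solution_spec : Claim_equal_solution := by
  intro answer_sheet sheets _ _
  unfold Spec_solution
  exact pv_main answer_sheet sheets
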